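-- pv_equiv track=rewrite | github.com/jwmatthews/playpen-pf-mig-skills | skills/migration-comparison/scripts/score_migration.py | _summarize_pattern
-- ===== SOURCE A (Python) =====
-- from typing import Any, Callable
--
-- def _summarize_pattern(
--     status: str, details: list[dict[str, Any]]
-- ) -> str:
--     """Generate a summary message for a pattern's overall result."""
--     if not details:
--         return "Not applicable to any files"
--     correct = sum(1 for d in details if d["status"] == "correct")
--     incorrect = sum(1 for d in details if d["status"] == "incorrect")
--     missing = sum(1 for d in details if d["status"] == "missing")
--     not_migrated = sum(1 for d in details if d["status"] == "not_migrated")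
--     total = len(details)
--
--     parts: list[str] = []
--     if correct:
--         parts.append(f"{correct}/{total} correct")
--     if incorrect:
--         parts.append(f"{incorrect}/{total} incorrect")
--     if missing:
--         parts.append(f"{missing}/{total} missing")
--     if not_migrated:
--         parts.append(f"{not_migrated}/{total} not migrated")
--     return ", ".join(parts) if parts else f"Status: {status}"
-- ===== SOURCE B (Python) =====
-- _LABELS = {
--     "correct": "correct",
--     "incorrect": "incorrect",
--     "missing": "missing",
--     "not_migrated": "not migrated",
-- }
--
--
-- def _runs(xs):
--     """Collapse a list into (value, run-length) pairs of consecutive equal elements."""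
--     if not xs:
--         return []
--     s = xs[0]
--     i = 1
--     while i < len(xs) and xs[i] == s:
--         i += 1
--     return [(s, i)] + _runs(xs[i:])
--
--
-- def _summarize_pattern(status, details):
--     """Sort the statuses and emit one part per labelled run; lexicographic order of the
--     four status keys coincides with the required report order."""
--     if not details:
--         return "Not applicable to any files"
--     total = len(details)
--     parts = []
--     for value, count in _runs(sorted(d["status"] for d in details)):
--         label = _LABELS.get(value)
--         if label is not None:
--             parts.append(f"{count}/{total} {label}")
--     return ", ".join(parts) if parts else f"Status: {status}"
-- ===== Notes on version B (the rewrite author's own statement) =====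
-- stated objective: alternative
-- what changed: Replaces four separate counting scans plus four hardcoded append branches with sort-then-group: sort the statuses, collapse consecutive runs into (value, length) pairs, and emit the labelled runs in sorted order (lexicographic order of the four keys coincides with the required report order).
import Mathlib
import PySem

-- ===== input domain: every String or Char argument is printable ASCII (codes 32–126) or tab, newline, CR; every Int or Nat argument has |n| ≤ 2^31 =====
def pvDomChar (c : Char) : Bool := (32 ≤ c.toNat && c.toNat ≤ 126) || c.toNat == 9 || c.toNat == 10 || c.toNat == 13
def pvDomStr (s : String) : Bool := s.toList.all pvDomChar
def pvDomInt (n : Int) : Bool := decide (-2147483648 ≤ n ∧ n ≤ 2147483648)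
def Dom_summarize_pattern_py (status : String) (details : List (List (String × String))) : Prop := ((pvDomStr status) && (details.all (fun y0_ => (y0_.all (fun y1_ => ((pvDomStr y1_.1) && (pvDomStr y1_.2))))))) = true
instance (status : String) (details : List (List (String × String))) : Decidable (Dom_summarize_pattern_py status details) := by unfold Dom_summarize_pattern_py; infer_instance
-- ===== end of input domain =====

-- B replaces A's four counting scans and four hardcoded branches with sort-then-group-runs: the report order arises from the sorted order of the status keys (alternative decomposition, same result).


-- ===== PORT A =====
-- d["status"]: first-match association-list lookup (total form; Pre_ guarantees the key is present)
def pvStat (d : List (String × String)) : String := ((d.find? (fun kv => kv.1 == "status")).map Prod.snd).getD ""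

def summarize_pattern_py (status : String) (details : List (List (String × String))) : String :=
  if details = [] then "Not applicable to any files" else
  let correct : Int := details.foldl (fun acc d => if pvStat d == "correct" then acc + 1 else acc) 0
  let incorrect : Int := details.foldl (fun acc d => if pvStat d == "incorrect" then acc + 1 else acc) 0
  let missing : Int := details.foldl (fun acc d => if pvStat d == "missing" then acc + 1 else acc) 0
  let not_migrated : Int := details.foldl (fun acc d => if pvStat d == "not_migrated" then acc + 1 else acc) 0
  let total : Int := details.length
  let parts : List String := []
  let parts := if correct ≠ 0 then parts ++ [PySem.Int.toStr correct ++ "/" ++ PySem.Int.toStr total ++ " correct"] else parts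
  let parts := if incorrect ≠ 0 then parts ++ [PySem.Int.toStr incorrect ++ "/" ++ PySem.Int.toStr total ++ " incorrect"] else parts
  let parts := if missing ≠ 0 then parts ++ [PySem.Int.toStr missing ++ "/" ++ PySem.Int.toStr total ++ " missing"] else parts
  let parts := if not_migrated ≠ 0 then parts ++ [PySem.Int.toStr not_migrated ++ "/" ++ PySem.Int.toStr total ++ " not migrated"] else parts
  if parts ≠ [] then PySem.Str.join ", " parts else "Status: " ++ status

-- ===== PORT B =====
-- module-level label table _LABELS
def pvLabels : PySem.Dict String String :=
  PySem.Dict.ofList [("correct", "correct"), ("incorrect", "incorrect"), ("missing", "missing"), ("not_migrated", "not migrated")]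

-- _runs: collapse a list into (value, run-length) pairs of consecutive equal elements
def pvRunsB : List String → List (String × Int)
  | [] => []
  | s :: rest =>
      (s, 1 + ((rest.takeWhile (fun x => x == s)).length : Int)) ::
        pvRunsB (rest.dropWhile (fun x => x == s))
  termination_by l => l.length
  decreasing_by simpa using Nat.lt_succ_of_le (List.length_dropWhile_le _ _)

def summarize_pattern_py_alt (status : String) (details : List (List (String × String))) : String :=
  if details = [] then "Not applicable to any files" else
  let total : Int := details.length
  let parts : List String :=
    (pvRunsB (PySem.List.sorted (details.map pvStat) (fun x => x) false)).foldl
      (fun acc r =>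
        match pvLabels.get? r.1 with
        | some label => acc ++ [PySem.Int.toStr r.2 ++ "/" ++ PySem.Int.toStr total ++ " " ++ label]
        | none => acc) []
  if parts ≠ [] then PySem.Str.join ", " parts else "Status: " ++ status

-- ===== PRECONDITION & SPEC =====
-- Pre_ excludes exactly the inputs where some entry lacks a "status" key: there both A and B raise KeyError.
def Pre_summarize_pattern_py (status : String) (details : List (List (String × String))) : Prop :=
  details.all (fun d => d.any (fun kv => kv.1 == "status")) = true
instance (status : String) (details : List (List (String × String))) : Decidable (Pre_summarize_pattern_py status details) := by unfold Pre_summarize_pattern_py; infer_instance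

def pvWitness_summarize_pattern_py : String × (List (List (String × String))) :=
  ("checked", [[("status", "correct")], [("status", "missing")]])

def Spec_summarize_pattern_py (status : String) (details : List (List (String × String))) (out : String) : Prop := out = summarize_pattern_py_alt status details
instance (status : String) (details : List (List (String × String))) (out : String) : Decidable (Spec_summarize_pattern_py status details out) := by unfold Spec_summarize_pattern_py; infer_instance

-- ===== CLAIM (what is proved, stated in full; the proofs are below) =====
def Claim_equal_summarize_pattern_py : Prop := ∀ (status : String) (details : List (List (String × String))), Dom_summarize_pattern_py status details → Pre_summarize_pattern_py status details → Spec_summarize_pattern_py status details (summarize_pattern_py status details)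

-- ===== LEMMAS AND PROOFS =====

-- the run keys are exactly the elements of the scanned list
theorem pv_mem_runs_keys (l : List String) (v : String) :
    v ∈ (pvRunsB l).map Prod.fst ↔ v ∈ l := by
  induction l using pvRunsB.induct with
  | case1 => simp [pvRunsB]
  | case2 s rest ih =>
    simp only [pvRunsB, List.map_cons, List.mem_cons, ih]
    constructor
    · rintro (rfl | h)
      · exact Or.inl rfl
      · exact Or.inr ((List.dropWhile_sublist _).subset h)
    · rintro (rfl | h)
      · exact Or.inl rfl
      · by_cases hv : v = s
        · exact Or.inl hv
        · refine Or.inr ?_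
          have ht := List.takeWhile_append_dropWhile (p := fun x => x == s) (l := rest)
          rw [← ht] at h
          rcases List.mem_append.mp h with h | h
          · exact absurd (by simpa using List.mem_takeWhile_imp h) hv
          · exact h

-- in a sorted list, everything past the run of the head is strictly greater than the head
theorem pv_drop_gt (s : String) (rest : List String)
    (hp : (s :: rest).Pairwise (· ≤ ·)) :
    ∀ x ∈ rest.dropWhile (fun x => x == s), s < x := by
  have hmin : ∀ x ∈ rest, s ≤ x := (List.pairwise_cons.mp hp).1
  have hpr : rest.Pairwise (· ≤ ·) := (List.pairwise_cons.mp hp).2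
  have hd : (rest.dropWhile (fun x => x == s)).Pairwise (· ≤ ·) :=
    List.Pairwise.sublist (List.dropWhile_sublist _) hpr
  intro x hx
  cases hcase : rest.dropWhile (fun x => x == s) with
  | nil => simp [hcase] at hx
  | cons h t =>
    have hh : ¬ (h == s) = true := by
      have hne : rest.dropWhile (fun x => x == s) ≠ [] := by simp [hcase]
      have := List.head_dropWhile_not (fun x => x == s) hne
      simp only [hcase, List.head_cons] at this
      simp [this]
    have hhs : s < h := lt_of_le_of_ne (hmin h ((List.dropWhile_sublist _).subset (by rw [hcase]; exact List.mem_cons_self ..)))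
      (fun he => hh (by simp [he.symm]))
    rw [hcase] at hx
    rcases List.mem_cons.mp hx with rfl | hx
    · exact hhs
    · have : h ≤ x := by
        rw [hcase] at hd
        exact (List.pairwise_cons.mp hd).1 x hx
      exact lt_of_lt_of_le hhs this

-- in a sorted list, each run records the total multiplicity of its value
theorem pv_runs_count (l : List String) (hp : l.Pairwise (· ≤ ·)) :
    ∀ v c, (v, c) ∈ pvRunsB l → c = (l.count v : Int) := by
  induction l using pvRunsB.induct with
  | case1 => simp [pvRunsB]
  | case2 s rest ih =>
    intro v c hm
    have hpr : rest.Pairwise (· ≤ ·) := (List.pairwise_cons.mp hp).2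
    have hgt := pv_drop_gt s rest hp
    have hsplit := List.takeWhile_append_dropWhile (p := fun x => x == s) (l := rest)
    rw [pvRunsB] at hm
    rcases List.mem_cons.mp hm with he | hm
    · -- head run
      have hv : v = s := congrArg Prod.fst he
      have hc : c = 1 + ((rest.takeWhile (fun x => x == s)).length : Int) := congrArg Prod.snd he
      have h1 : (rest.takeWhile (fun x => x == s)).count s = (rest.takeWhile (fun x => x == s)).length :=
        List.count_eq_length.mpr (fun a ha => by have hb := List.mem_takeWhile_imp ha; exact (eq_of_beq hb).symm)
      have h2 : (rest.dropWhile (fun x => x == s)).count s = 0 :=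
        List.count_eq_zero.mpr (fun hmem => absurd rfl (ne_of_gt (hgt s hmem)))
      have h3 : rest.count s = (rest.takeWhile (fun x => x == s) ++ rest.dropWhile (fun x => x == s)).count s := by
        rw [hsplit]
      have hcnt : (s :: rest).count s = 1 + (rest.takeWhile (fun x => x == s)).length := by
        rw [List.count_cons_self, h3, List.count_append, h1, h2]
        omega
      rw [hv, hc, hcnt]
      push_cast
      ring
    · -- tail runs
      have hdp : (rest.dropWhile (fun x => x == s)).Pairwise (· ≤ ·) :=
        List.Pairwise.sublist (List.dropWhile_sublist _) hpr
      have hc := ih hdp v c hm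
      have hvmem : v ∈ rest.dropWhile (fun x => x == s) :=
        (pv_mem_runs_keys (rest.dropWhile (fun x => x == s)) v).mp
          (List.mem_map.mpr ⟨(v, c), hm, rfl⟩)
      have hvs : s < v := hgt v hvmem
      have hnotin : v ∉ rest.takeWhile (fun x => x == s) := fun hmem => by
        have hb := List.mem_takeWhile_imp hmem
        exact (ne_of_lt hvs) (eq_of_beq hb).symm
      have h1 : (rest.takeWhile (fun x => x == s)).count v = 0 := List.count_eq_zero.mpr hnotin
      have h3 : rest.count v = (rest.takeWhile (fun x => x == s) ++ rest.dropWhile (fun x => x == s)).count v := by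
        rw [hsplit]
      have hcnt : (s :: rest).count v = (rest.dropWhile (fun x => x == s)).count v := by
        rw [List.count_cons_of_ne (ne_of_lt hvs), h3, List.count_append, h1]
        omega
      rw [hc, hcnt]

-- in a sorted list, the run keys are strictly increasing
theorem pv_runs_keys_sorted (l : List String) (hp : l.Pairwise (· ≤ ·)) :
    ((pvRunsB l).map Prod.fst).Pairwise (· < ·) := by
  induction l using pvRunsB.induct with
  | case1 => simp [pvRunsB]
  | case2 s rest ih =>
    have hpr : rest.Pairwise (· ≤ ·) := (List.pairwise_cons.mp hp).2
    have hdp : (rest.dropWhile (fun x => x == s)).Pairwise (· ≤ ·) :=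
      List.Pairwise.sublist (List.dropWhile_sublist _) hpr
    simp only [pvRunsB, List.map_cons, List.pairwise_cons]
    refine ⟨?_, ih hdp⟩
    intro v hv
    exact pv_drop_gt s rest hp v ((pv_mem_runs_keys _ v).mp hv)

-- two strictly increasing lists with the same members are equal
theorem pv_strict_ext (l1 l2 : List String)
    (h1 : l1.Pairwise (· < ·)) (h2 : l2.Pairwise (· < ·))
    (hm : ∀ x, x ∈ l1 ↔ x ∈ l2) : l1 = l2 := by
  have nd1 : l1.Nodup := h1.imp ne_of_lt
  have nd2 : l2.Nodup := h2.imp ne_of_lt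
  have hp : l1.Perm l2 := (List.perm_ext_iff_of_nodup nd1 nd2).mpr hm
  exact hp.eq_of_pairwise (fun a b _ _ hab hba => absurd hba (asymm hab)) h1 h2

-- keys whose entries contribute nothing may be filtered out of the flatMap
theorem pv_flatMap_filter {α : Type} (g : α → List String) (q : α → Bool) (ks : List α)
    (h : ∀ v ∈ ks, q v = false → g v = []) :
    ks.flatMap g = (ks.filter q).flatMap g := by
  induction ks with
  | nil => simp
  | cons a t ih =>
    have ht : ∀ v ∈ t, q v = false → g v = [] := fun v hv => h v (List.mem_cons_of_mem _ hv)
    cases hq : q a with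
    | true => simp [hq, ih ht]
    | false => simp [hq, ih ht, h a List.mem_cons_self hq]

-- the body of B's loop as a list-producing function of one run
def pvGG (total : Int) (r : String × Int) : List String :=
  match pvLabels.get? r.1 with
  | some lab => [PySem.Int.toStr r.2 ++ "/" ++ PySem.Int.toStr total ++ " " ++ lab]
  | none => []

theorem pvLabels_eq : pvLabels = PySem.Dict.mk [("correct", "correct"), ("incorrect", "incorrect"), ("missing", "missing"), ("not_migrated", "not migrated")] := by decide

-- a key is labelled exactly when it is one of the four status keys
theorem pv_q_iff (x : String) : ((pvLabels.get? x).isSome = true) ↔ x ∈ (["correct","incorrect","missing","not_migrated"] : List String) := by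
  rw [pvLabels_eq]
  simp only [PySem.Dict.get?_mk_cons, List.mem_cons, List.not_mem_nil, or_false]
  split_ifs with h1 h2 h3 h4
  · simp [(beq_iff_eq.mp h1).symm]
  · simp [(beq_iff_eq.mp h2).symm]
  · simp [(beq_iff_eq.mp h3).symm]
  · simp [(beq_iff_eq.mp h4).symm]
  · constructor
    · intro h
      exfalso
      simp [PySem.Dict.get?] at h
    · rintro (rfl | rfl | rfl | rfl) <;> simp_all

-- B's run loop produces exactly A's four conditional parts
theorem pv_parts_eq (l : List String) (total : Int) :
    (pvRunsB (PySem.List.sorted l (fun x => x) false)).foldl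
      (fun acc r =>
        match pvLabels.get? r.1 with
        | some label => acc ++ [PySem.Int.toStr r.2 ++ "/" ++ PySem.Int.toStr total ++ " " ++ label]
        | none => acc) []
    = (if (l.count "correct" : Int) ≠ 0 then [PySem.Int.toStr (l.count "correct" : Int) ++ "/" ++ PySem.Int.toStr total ++ " correct"] else [])
      ++ (if (l.count "incorrect" : Int) ≠ 0 then [PySem.Int.toStr (l.count "incorrect" : Int) ++ "/" ++ PySem.Int.toStr total ++ " incorrect"] else [])
      ++ (if (l.count "missing" : Int) ≠ 0 then [PySem.Int.toStr (l.count "missing" : Int) ++ "/" ++ PySem.Int.toStr total ++ " missing"] else [])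
      ++ (if (l.count "not_migrated" : Int) ≠ 0 then [PySem.Int.toStr (l.count "not_migrated" : Int) ++ "/" ++ PySem.Int.toStr total ++ " not migrated"] else []) := by
  have hstep : (fun (acc : List String) (r : String × Int) =>
      match pvLabels.get? r.1 with
      | some label => acc ++ [PySem.Int.toStr r.2 ++ "/" ++ PySem.Int.toStr total ++ " " ++ label]
      | none => acc) = (fun acc r => acc ++ pvGG total r) := by
    funext acc r
    unfold pvGG
    cases pvLabels.get? r.1 <;> simp
  rw [hstep, PySem.List.foldl_append_eq_flatMap, List.nil_append]
  set S := PySem.List.sorted l (fun x => x) false with hSdef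
  have hperm : S.Perm l := PySem.List.sorted_perm l (fun x => x) false
  have hsorted : S.Pairwise (· ≤ ·) := PySem.List.sorted_pairwise l (fun x => x)
  have hcnt : ∀ v, S.count v = l.count v := fun v => hperm.count_eq v
  -- replace each run's length by the count of its key
  have h2 : (pvRunsB S).flatMap (pvGG total)
      = ((pvRunsB S).map Prod.fst).flatMap (fun v => pvGG total (v, (l.count v : Int))) := by
    rw [List.flatMap_map]
    exact List.flatMap_congr (fun r hr => by
      rcases r with ⟨v, c⟩
      have hc := pv_runs_count S hsorted v c hr
      rw [hc, hcnt v])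
  rw [h2]
  -- restrict to the labelled keys
  have h3 : ((pvRunsB S).map Prod.fst).flatMap (fun v => pvGG total (v, (l.count v : Int)))
      = (((pvRunsB S).map Prod.fst).filter (fun v => (pvLabels.get? v).isSome)).flatMap
          (fun v => pvGG total (v, (l.count v : Int))) := by
    refine pv_flatMap_filter _ _ _ (fun v _ hq => ?_)
    unfold pvGG
    simp only
    cases hg : pvLabels.get? v with
    | none => simp
    | some lab => rw [hg] at hq; simp at hq
  rw [h3]
  -- the filtered key list is the four labelled keys that occur, in their lexicographic order
  have h4 : ((pvRunsB S).map Prod.fst).filter (fun v => (pvLabels.get? v).isSome)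
      = (["correct","incorrect","missing","not_migrated"] : List String).filter (fun k => decide (k ∈ l)) := by
    refine pv_strict_ext _ _ ((pv_runs_keys_sorted S hsorted).filter _)
      (List.Pairwise.filter _ (by simp only [String.lt_iff_toList_lt]; decide)) ?_
    intro x
    have hmemks : x ∈ (pvRunsB S).map Prod.fst ↔ x ∈ l :=
      (pv_mem_runs_keys S x).trans hperm.mem_iff
    simp only [List.mem_filter, hmemks, pv_q_iff, decide_eq_true_eq]
    tauto
  rw [h4]
  -- evaluate the four-key table
  have icond : ∀ v : String, ((l.count v : Int) ≠ 0) ↔ v ∈ l := by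
    intro v
    simp [Int.natCast_eq_zero, List.count_eq_zero]
  simp only [icond]
  have e1 : pvLabels.get? "correct" = some "correct" := rfl
  have e2 : pvLabels.get? "incorrect" = some "incorrect" := rfl
  have e3 : pvLabels.get? "missing" = some "missing" := rfl
  have e4 : pvLabels.get? "not_migrated" = some "not migrated" := rfl
  have s1 : (" " : String) ++ "correct" = " correct" := rfl
  have s2 : (" " : String) ++ "incorrect" = " incorrect" := rfl
  have s3 : (" " : String) ++ "missing" = " missing" := rfl
  have s4 : (" " : String) ++ "not migrated" = " not migrated" := rfl
  by_cases c1 : "correct" ∈ l <;> by_cases c2 : "incorrect" ∈ l <;>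
    by_cases c3 : "missing" ∈ l <;> by_cases c4 : "not_migrated" ∈ l <;>
      simp [c1, c2, c3, c4, pvGG, e1, e2, e3, e4, String.append_assoc, s1, s2, s3, s4]

-- A's conditional-count foldl over details equals count of s in the mapped statuses
theorem pv_count_foldl (details : List (List (String × String))) (s : String) :
    details.foldl (fun acc d => if pvStat d == s then acc + 1 else acc) 0
      = ((details.map pvStat).count s : Int) := by
  have h := PySem.List.foldl_beq_add_one (l := details.map pvStat) (v := s) (a := (0 : Int))
  rw [List.foldl_map] at h
  simpa using h

-- appending under a condition, pulled out of the if
theorem pv_ite_append (b : Prop) [Decidable b] (p : List String) (u : String) :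
    (if b then p ++ [u] else p) = p ++ (if b then [u] else []) := by
  split <;> simp

-- ===== VERDICT (by name: the statement is the Claim_ definition above) =====
theorem summarize_pattern_py_spec : Claim_equal_summarize_pattern_py := by
  intro status details _ _
  unfold Spec_summarize_pattern_py summarize_pattern_py summarize_pattern_py_alt
  by_cases hnil : details = []
  · simp [hnil]
  · simp only [hnil, if_false]
    rw [pv_count_foldl details "correct", pv_count_foldl details "incorrect",
        pv_count_foldl details "missing", pv_count_foldl details "not_migrated",
        pv_parts_eq (details.map pvStat) (details.length : Int)]
    simp only [pv_ite_append]
    simp [List.append_assoc]
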